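-- pv_equiv track=rewrite | github.com/gaurapanasenko/unilab | 14/MaAfSDOP/lab1_1.py | gen_sols
-- ===== SOURCE A (Python) =====
-- def gen_sols(sol: tuple[int, ...], n, r):
--     """Генерація всіх можливих сполучень для заданого n та r."""
--     if len(sol) == r:
--         if sum(sol) == n:
--             yield sol
--         return
--     for i in range(n - sum(sol), -1, -1):
--         for sol_j in gen_sols(sol + (i,), n, r):
--             yield sol_j
-- ===== SOURCE B (Python) =====
-- def gen_sols(sol, n, r):
--     """Генерація всіх можливих сполучень для заданого n та r."""
--     k = r - len(sol)
--     rem = n - sum(sol)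
--     if k == 0:
--         if rem == 0:
--             yield sol
--         return
--     if k < 0 or rem < 0:
--         return
--     # breadth-first: expand a whole level of (prefix, remainder) pairs per stage,
--     # then close the forced last slot with the remainder
--     level = [(sol, rem)]
--     for _ in range(k - 1):
--         level = [(p + (i,), s - i) for (p, s) in level for i in range(s, -1, -1)]
--     for p, s in level:
--         yield p + (s,)
-- ===== Notes on version B (the rewrite author's own statement) =====
-- stated objective: alternative
-- what changed: B replaces A's depth-first recursion by an iterative breadth-first construction: it keeps a worklist of (prefix, remainder) pairs, expands the whole level with one list comprehension per stage, and closes the forced last slot with the remainder instead of scanning all candidates and filtering by sum.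
import Mathlib
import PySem

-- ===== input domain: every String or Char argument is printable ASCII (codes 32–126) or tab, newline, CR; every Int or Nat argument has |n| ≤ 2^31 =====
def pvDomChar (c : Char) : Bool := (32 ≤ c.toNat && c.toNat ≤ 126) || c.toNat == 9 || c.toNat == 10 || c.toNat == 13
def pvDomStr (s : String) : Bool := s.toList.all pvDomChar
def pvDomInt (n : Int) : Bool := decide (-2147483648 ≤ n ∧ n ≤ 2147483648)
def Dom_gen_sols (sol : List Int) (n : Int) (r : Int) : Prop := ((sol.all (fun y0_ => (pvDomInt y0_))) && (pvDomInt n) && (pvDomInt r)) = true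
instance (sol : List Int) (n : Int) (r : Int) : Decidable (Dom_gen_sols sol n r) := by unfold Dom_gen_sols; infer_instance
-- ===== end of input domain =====

-- B replaces A's depth-first recursion by an iterative breadth-first construction over a
-- worklist of (prefix, remainder) pairs, closing the forced last slot with the remainder.
-- (Both Pythons are generators; equivalence is about the list of yielded tuples.)

-- ===== PORT A =====
-- A's recursion adds one element per call; under Pre_ it makes at most (r - len sol).toNat
-- nested calls, so that fuel makes the port total and faithful on Pre_.
def genSolsA (fuel : Nat) (sol : List Int) (n : Int) (r : Int) : List (List Int) :=
  if (sol.length : Int) = r then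
    (if sol.sum = n then [sol] else [])
  else
    match fuel with
    | 0 => []   -- unreachable inside Pre_ (there either len = r, or the range below is empty)
    | f + 1 =>
      (PySem.List.pyRange (n - sol.sum) (-1) (-1)).foldl
        (fun acc i => acc ++ genSolsA f (sol ++ [i]) n r) []

def gen_sols (sol : List Int) (n : Int) (r : Int) : List (List Int) :=
  genSolsA (r - (sol.length : Int)).toNat sol n r

-- ===== PORT B =====
-- one stage of Source B's loop body: the list comprehension expanding a whole level
def stageB (level : List (List Int × Int)) : List (List Int × Int) :=
  level.flatMap (fun ps =>
    (PySem.List.pyRange ps.2 (-1) (-1)).map (fun i => (ps.1 ++ [i], ps.2 - i)))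

def gen_sols_alt (sol : List Int) (n : Int) (r : Int) : List (List Int) :=
  let k : Int := r - sol.length
  let rem : Int := n - sol.sum
  if k = 0 then (if rem = 0 then [sol] else [])
  else if k < 0 ∨ rem < 0 then []
  else
    (stageB^[(k - 1).toNat] [(sol, rem)]).map (fun ps => ps.1 ++ [ps.2])

-- ===== PRECONDITION & SPEC =====
-- Pre_ excludes exactly the inputs where Python A never returns (RecursionError):
-- len(sol) > r together with a nonnegative remainder n - sum(sol).
def Pre_gen_sols (sol : List Int) (n : Int) (r : Int) : Prop :=
  (sol.length : Int) ≤ r ∨ n - sol.sum < 0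
instance (sol : List Int) (n : Int) (r : Int) : Decidable (Pre_gen_sols sol n r) := by
  unfold Pre_gen_sols; infer_instance

def pvWitness_gen_sols : List Int × Int × Int := ([], 3, 2)

def Spec_gen_sols (sol : List Int) (n : Int) (r : Int) (out : List (List Int)) : Prop := out = gen_sols_alt sol n r
instance (sol : List Int) (n : Int) (r : Int) (out : List (List Int)) : Decidable (Spec_gen_sols sol n r out) := by unfold Spec_gen_sols; infer_instance

-- ===== CLAIM =====
def Claim_equal_gen_sols : Prop := ∀ (sol : List Int) (n : Int) (r : Int), Dom_gen_sols sol n r → Pre_gen_sols sol n r → Spec_gen_sols sol n r (gen_sols sol n r)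

-- ===== LEMMAS AND PROOFS =====

-- The deepest level of A: only i = rem survives the final sum test.
lemma flatMap_last_level (sol : List Int) (rem : Int) :
    (PySem.List.pyRange rem (-1) (-1)).flatMap
      (fun i => if rem - i = 0 then [sol ++ [i]] else []) =
    (if 0 ≤ rem then [sol ++ [rem]] else []) := by
  by_cases h : 0 ≤ rem
  · rw [PySem.List.pyRange_neg_one_cons (by omega : (-1 : Int) < rem)]
    have htail : (PySem.List.pyRange (rem - 1) (-1) (-1)).flatMap
        (fun i => if rem - i = 0 then [sol ++ [i]] else []) = [] := by
      rw [List.flatMap_eq_nil_iff]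
      intro i hi
      rw [PySem.List.mem_pyRange_neg_one] at hi
      rw [if_neg (by omega)]
    simp [htail, h]
  · rw [PySem.List.pyRange_neg_one_eq_nil (by omega : rem ≤ (-1 : Int))]
    simp [h]

-- stageB iterated distributes over the elements of its worklist
lemma stageB_iterate_flatMap (f : Nat) : ∀ (xs : List (List Int × Int)),
    stageB^[f] xs = xs.flatMap (fun p => stageB^[f] [p]) := by
  induction f with
  | zero => intro xs; simp
  | succ f ih =>
    intro xs
    have hstage : ∀ ys : List (List Int × Int),
        stageB ys = ys.flatMap (fun p => stageB [p]) := by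
      intro ys; unfold stageB; simp
    rw [Function.iterate_succ_apply, hstage, ih, List.flatMap_assoc]
    apply List.flatMap_congr
    intro p _
    rw [← ih, ← Function.iterate_succ_apply]

-- main correspondence: A with f+1 slots left equals B's f expansion stages plus the
-- forced last slot, whenever the remainder is nonnegative.
lemma genAB (f : Nat) : ∀ (sol : List Int) (n r : Int),
    (sol.length : Int) + (f + 1 : Nat) = r → 0 ≤ n - sol.sum →
    genSolsA (f + 1) sol n r
      = (stageB^[f] [(sol, n - sol.sum)]).map (fun ps => ps.1 ++ [ps.2]) := by
  induction f with
  | zero =>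
    intro sol n r h hrem
    have hne : (sol.length : Int) ≠ r := by push_cast at h; omega
    rw [genSolsA, if_neg hne, PySem.List.foldl_append_eq_flatMap, List.nil_append]
    have hleaf : ∀ i : Int, genSolsA 0 (sol ++ [i]) n r
        = if (n - sol.sum) - i = 0 then [sol ++ [i]] else [] := by
      intro i
      have hlen : ((sol ++ [i]).length : Int) = r := by
        push_cast at h ⊢; simp; omega
      rw [genSolsA, if_pos hlen]
      have hsum : (sol ++ [i]).sum = sol.sum + i := by simp
      by_cases hc : (n - sol.sum) - i = 0
      · rw [if_pos (by omega : (sol ++ [i]).sum = n), if_pos hc]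
      · rw [if_neg (by omega : ¬ (sol ++ [i]).sum = n), if_neg hc]
    calc (PySem.List.pyRange (n - sol.sum) (-1) (-1)).flatMap
            (fun i => genSolsA 0 (sol ++ [i]) n r)
        = (PySem.List.pyRange (n - sol.sum) (-1) (-1)).flatMap
            (fun i => if (n - sol.sum) - i = 0 then [sol ++ [i]] else []) :=
          List.flatMap_congr (fun i _ => hleaf i)
      _ = (if 0 ≤ n - sol.sum then [sol ++ [n - sol.sum]] else []) :=
          flatMap_last_level sol (n - sol.sum)
      _ = (stageB^[0] [(sol, n - sol.sum)]).map (fun ps => ps.1 ++ [ps.2]) := by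
          rw [if_pos hrem]; simp
  | succ f ih =>
    intro sol n r h hrem
    have hne : (sol.length : Int) ≠ r := by push_cast at h; omega
    rw [genSolsA, if_neg hne, PySem.List.foldl_append_eq_flatMap, List.nil_append]
    have hstep : ∀ i ∈ PySem.List.pyRange (n - sol.sum) (-1) (-1),
        genSolsA (f + 1) (sol ++ [i]) n r
          = (stageB^[f] [(sol ++ [i], (n - sol.sum) - i)]).map (fun ps => ps.1 ++ [ps.2]) := by
      intro i hi
      rw [PySem.List.mem_pyRange_neg_one] at hi
      have hlen : ((sol ++ [i]).length : Int) + (f + 1 : Nat) = r := by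
        push_cast at h ⊢; simp; omega
      have hsum : n - (sol ++ [i]).sum = (n - sol.sum) - i := by simp; omega
      rw [ih (sol ++ [i]) n r hlen (by omega), hsum]
    have hexpand : stageB^[f + 1] [(sol, n - sol.sum)]
        = (PySem.List.pyRange (n - sol.sum) (-1) (-1)).flatMap
            (fun i => stageB^[f] [(sol ++ [i], (n - sol.sum) - i)]) := by
      rw [Function.iterate_succ_apply]
      have h1 : stageB [(sol, n - sol.sum)]
          = (PySem.List.pyRange (n - sol.sum) (-1) (-1)).map
              (fun i => (sol ++ [i], (n - sol.sum) - i)) := by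
        unfold stageB; simp
      rw [h1, stageB_iterate_flatMap, List.flatMap_map]
    rw [hexpand, List.map_flatMap]
    exact (List.flatMap_congr (fun i hi => (hstep i hi).symm)).symm

-- ===== VERDICT =====
theorem gen_sols_spec : Claim_equal_gen_sols := by
  intro sol n r _ hpre
  unfold Spec_gen_sols gen_sols gen_sols_alt
  simp only []
  by_cases hk0 : r - (sol.length : Int) = 0
  · have : (r - (sol.length : Int)).toNat = 0 := by omega
    rw [this, if_pos hk0, genSolsA, if_pos (by omega)]
    by_cases hs : sol.sum = n
    · rw [if_pos hs, if_pos (by omega)]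
    · rw [if_neg hs, if_neg (by omega)]
  · rw [if_neg hk0]
    by_cases hkneg : r - (sol.length : Int) < 0
    · -- len > r: Pre_ forces a negative remainder; both sides are []
      have : (r - (sol.length : Int)).toNat = 0 := by omega
      rw [this, if_pos (Or.inl hkneg), genSolsA, if_neg (by omega)]
    · by_cases hrem : n - sol.sum < 0
      · -- nonempty slots but negative remainder: A's range is empty
        have hf : (r - (sol.length : Int)).toNat = ((r - (sol.length : Int)).toNat - 1) + 1 := by
          omega
        rw [if_pos (Or.inr hrem), hf, genSolsA, if_neg (by omega),
          PySem.List.pyRange_neg_one_eq_nil (by omega : n - sol.sum ≤ (-1 : Int))]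
        simp
      · rw [if_neg (by omega : ¬ (r - (sol.length : Int) < 0 ∨ n - sol.sum < 0))]
        have hf : (r - (sol.length : Int)).toNat
            = ((r - (sol.length : Int)) - 1).toNat + 1 := by omega
        rw [hf]
        exact genAB _ sol n r (by push_cast; omega) (by omega)
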